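-- pv_equiv track=rewrite | github.com/ParkinsonLab/MetaPro | Scripts/ta_taxid_v2.py | import_genes
-- ===== SOURCE A (Python) =====
-- def import_genes(gene2read_dict):
--     #collection of genes, extracted.
--     #change this, later.  doesn't need a 2nd loop
--     genes = {}
--
--     for gene in gene2read_dict:
--         try:
--             accession = gene.split("|")[3].split(".")[0]
--         except:
--             accession = gene.split(".")[0]
--         if accession in genes:
--             genes[accession].append(gene)
--         else:
--             genes[accession] = [gene]
--     return genes
-- ===== SOURCE B (Python) =====
-- def import_genes(gene2read_dict):
--     def accession_of(gene):
--         try: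
--             return gene.split("|")[3].split(".")[0]
--         except:
--             return gene.split(".")[0]
--     pairs = [(accession_of(g), g) for g in gene2read_dict]
--     keys = list(dict.fromkeys(a for a, g in pairs))
--     return {k: [g for a, g in pairs if a == k] for k in keys}
-- ===== Notes on version B (the rewrite author's own statement) =====
-- stated objective: alternative
-- what changed: Replaces A's incremental dict mutation (per-gene membership test + append/assign) with a declarative grouping: compute the (accession, gene) pairs once, dedup the accessions for the key order, then build each group by filtering the pair list on its key.
import Mathlib
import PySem

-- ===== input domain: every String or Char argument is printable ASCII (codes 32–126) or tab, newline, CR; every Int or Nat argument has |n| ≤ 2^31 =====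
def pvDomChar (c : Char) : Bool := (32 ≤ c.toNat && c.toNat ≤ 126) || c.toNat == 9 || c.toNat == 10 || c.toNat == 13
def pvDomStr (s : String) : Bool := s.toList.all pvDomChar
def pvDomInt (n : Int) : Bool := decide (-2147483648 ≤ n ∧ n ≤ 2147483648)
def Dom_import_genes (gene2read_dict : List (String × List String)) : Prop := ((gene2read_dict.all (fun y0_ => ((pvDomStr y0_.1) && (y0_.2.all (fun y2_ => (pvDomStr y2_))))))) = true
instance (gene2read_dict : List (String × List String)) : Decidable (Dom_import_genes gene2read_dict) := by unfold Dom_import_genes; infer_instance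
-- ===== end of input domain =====

-- B replaces A's incremental dict mutation (per-gene membership test + append/assign) with a
-- declarative grouping: dedup the accessions once for the key order, then filter the gene list per key
-- (objective: alternative decomposition, not claimed faster).

-- shared accession extraction (copied verbatim from both Pythons' try/except logic:
-- gene.split("|")[3] raises IndexError exactly when there are fewer than 4 pieces, so the
-- try/except is the length test; split with a non-empty separator never returns [], so
-- `.getD []` and `.headD ""` are exact here)
def pyAccession (gene : String) : String :=
  let parts := (PySem.Str.split? gene "|").getD []
  if 3 < parts.length then ((PySem.Str.split? (parts.getD 3 "") ".").getD []).headD ""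
  else ((PySem.Str.split? gene ".").getD []).headD ""

-- ===== PORT A =====
def import_genes (gene2read_dict : List (String × List String)) : List (String × List String) :=
  (gene2read_dict.foldl
    (fun (genes : PySem.Dict String (List String)) p =>
      let gene := p.1
      let accession := pyAccession gene
      if genes.contains accession then genes.modify accession [] (fun l => l ++ [gene])
      else genes.insert accession [gene])
    PySem.Dict.empty).items

-- ===== PORT B =====
def import_genes_alt (gene2read_dict : List (String × List String)) : List (String × List String) :=
  let pairs := gene2read_dict.map (fun p => (pyAccession p.1, p.1))
  let keys := PySem.List.dedup (pairs.map (·.1))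
  keys.map (fun k => (k, (pairs.filter (fun q => q.1 == k)).map (·.2)))

-- ===== PRECONDITION & SPEC =====
def Spec_import_genes (gene2read_dict : List (String × List String)) (out : List (String × List String)) : Prop := out = import_genes_alt gene2read_dict
instance (gene2read_dict : List (String × List String)) (out : List (String × List String)) : Decidable (Spec_import_genes gene2read_dict out) := by unfold Spec_import_genes; infer_instance

-- ===== CLAIM (what is proved, stated in full; the proofs are below) =====
def Claim_equal_import_genes : Prop := ∀ (gene2read_dict : List (String × List String)), Dom_import_genes gene2read_dict → Spec_import_genes gene2read_dict (import_genes gene2read_dict)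

-- ===== LEMMAS AND PROOFS =====

-- A's two-branch loop body is exactly Dict.modify (append, with default []).
theorem step_eq_modify (d : PySem.Dict String (List String)) (g : String) :
    (if d.contains (pyAccession g) then d.modify (pyAccession g) [] (fun l => l ++ [g])
     else d.insert (pyAccession g) [g])
    = d.modify (pyAccession g) [] (fun l => l ++ [g]) := by
  by_cases h : d.contains (pyAccession g) = true
  · simp [h]
  · simp only [Bool.not_eq_true] at h
    simp [h, PySem.Dict.modify, PySem.Dict.getD_of_not_contains d [] h]

-- The grouping fold from the empty dict, characterised key-by-key.
theorem fold_items (gs : List String) :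
    (gs.foldl (fun (d : PySem.Dict String (List String)) g =>
        d.modify (pyAccession g) [] (fun l => l ++ [g])) PySem.Dict.empty).items
    = (PySem.List.dedup ((gs.map (fun g => (pyAccession g, g))).map (·.1))).map
        (fun k => (k, ((gs.map (fun g => (pyAccession g, g))).filter
            (fun q => q.1 == k)).map (·.2))) := by
  set pairs := gs.map (fun g => (pyAccession g, g)) with hp
  set D := gs.foldl (fun (d : PySem.Dict String (List String)) g =>
      d.modify (pyAccession g) [] (fun l => l ++ [g])) PySem.Dict.empty with hD
  have hmap : D = pairs.foldl
      (fun (d : PySem.Dict String (List String)) p =>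
        d.modify p.1 [] (fun l => l ++ [p.2])) PySem.Dict.empty := by
    rw [hD, hp, List.foldl_map]
  have hkeys : D.keys = PySem.List.dedup (pairs.map (·.1)) := by
    rw [hmap, PySem.Dict.keys_foldl_modify_key]
    simp [PySem.Dict.keys_empty, PySem.Set.update, PySem.Set.ofList_eq_foldl]
  have hnd : D.keys.Nodup := by
    rw [hmap]
    exact PySem.Dict.nodup_keys_foldl_modify_key pairs (·.1) []
      (fun d p => fun l => l ++ [p.2]) PySem.Dict.empty (by simp [PySem.Dict.keys_empty])
  have hgetD : ∀ k, D.getD k [] = (pairs.filter (fun q => q.1 == k)).map (·.2) := by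
    intro k
    rw [hmap, PySem.Dict.getD_foldl_modify_append]
    simp
  rw [PySem.Dict.items_eq_map_keys D hnd []]
  rw [hkeys]
  exact List.map_congr_left (fun k _ => by rw [hgetD k])

-- ===== VERDICT (by name: the statement is the Claim_ definition above) =====
theorem import_genes_spec : Claim_equal_import_genes := by
  intro d _
  show import_genes d = import_genes_alt d
  unfold import_genes import_genes_alt
  have h1 : d.foldl
      (fun (genes : PySem.Dict String (List String)) p =>
        let gene := p.1
        let accession := pyAccession gene
        if genes.contains accession then genes.modify accession [] (fun l => l ++ [gene])
        else genes.insert accession [gene])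
      PySem.Dict.empty
      = (d.map (·.1)).foldl (fun (genes : PySem.Dict String (List String)) g =>
          genes.modify (pyAccession g) [] (fun l => l ++ [g])) PySem.Dict.empty := by
    rw [List.foldl_map]
    exact PySem.List.foldl_congr_mem d _ _ _ (fun acc p _ => step_eq_modify acc p.1)
  rw [h1, fold_items]
  simp only [List.map_map]
  rfl
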